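-- pv_equiv track=rewrite | github.com/yaselmo/Tracklet | src/backend/Tracklet/stock/management/commands/seed_tracklet_inventory.py | deterministic_location_name
-- ===== SOURCE A (Python) =====
-- SEED_DATA = {
--     'Wave Probes': [
--         'WP_15cm',
--         'WP_10cm',
--         'WP_30cm',
--         'WP_45cm',
--         'WP_65cm',
--         'WP_100cm',
--     ],
--     'Wave Gauge Heads': {
--         'AWP24-3': 5,
--         'AWP24-2': 8,
--         'AWP24': 13,
--     },
--     'Cameras': [
--         'Nikon D90',
--         'Nikon D5300',
--         'Nikon D7500',
--         'Canon Rebel',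
--     ],
--     'Cables': [
--         'Pressure sensor cable',
--         'BNC cable',
--         '6 pin cable',
--         'AC power cable',
--         'Ethernet cable',
--     ],
--     'Devices': [
--         'WiFi switch',
--         'Transmitter receiver',
--     ],
--     'Displacement Sensors': [
--         'DP 1m',
--         'DP 0.5m',
--         'DP 3m',
--     ],
-- }
--
-- SEED_LOCATIONS = ['LWB', 'CWB', 'LWF', 'SWL', 'MWF']
--
-- def deterministic_location_name(item_name: str) -> str:
--     """Assign a stock location using stable round-robin ordering by item name."""
--     ordered_names = []
--
--     for category_name, items in SEED_DATA.items():
--         normalized_items = items.keys() if isinstance(items, dict) else items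
--         ordered_names.extend((category_name, item_name) for item_name in normalized_items)
--
--     ordered_names.sort(key=lambda value: (value[0], value[1]))
--     item_names = [value[1] for value in ordered_names]
--
--     index = item_names.index(item_name)
--     return SEED_LOCATIONS[index % len(SEED_LOCATIONS)]
-- ===== SOURCE B (Python) =====
-- # The seed data is a fixed module constant, so the round-robin assignment
-- # (index in the list of (category, name) pairs sorted lexicographically,
-- # modulo len(SEED_LOCATIONS)) is a fixed finite map; precompute it once
-- # instead of rebuilding and sorting the table on every call.
-- LOCATION_BY_ITEM = {
--     '6 pin cable': 'LWB',
--     'AC power cable': 'CWB',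
--     'BNC cable': 'LWF',
--     'Ethernet cable': 'SWL',
--     'Pressure sensor cable': 'MWF',
--     'Canon Rebel': 'LWB',
--     'Nikon D5300': 'CWB',
--     'Nikon D7500': 'LWF',
--     'Nikon D90': 'SWL',
--     'Transmitter receiver': 'MWF',
--     'WiFi switch': 'LWB',
--     'DP 0.5m': 'CWB',
--     'DP 1m': 'LWF',
--     'DP 3m': 'SWL',
--     'AWP24': 'MWF',
--     'AWP24-2': 'LWB',
--     'AWP24-3': 'CWB',
--     'WP_100cm': 'LWF',
--     'WP_10cm': 'SWL',
--     'WP_15cm': 'MWF',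
--     'WP_30cm': 'LWB',
--     'WP_45cm': 'CWB',
--     'WP_65cm': 'LWF',
-- }
--
-- def deterministic_location_name(item_name: str) -> str:
--     """Assign a stock location using stable round-robin ordering by item name."""
--     return LOCATION_BY_ITEM[item_name]
-- ===== Notes on version B (the rewrite author's own statement) =====
-- stated objective: faster
-- what changed: A rebuilds and sorts the full (category, name) table and calls list.index on every call; B looks the name up in a precomputed constant dict mapping each seed item to its round-robin location (the seed data is a fixed module constant, so the map is fixed).
import Mathlib
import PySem

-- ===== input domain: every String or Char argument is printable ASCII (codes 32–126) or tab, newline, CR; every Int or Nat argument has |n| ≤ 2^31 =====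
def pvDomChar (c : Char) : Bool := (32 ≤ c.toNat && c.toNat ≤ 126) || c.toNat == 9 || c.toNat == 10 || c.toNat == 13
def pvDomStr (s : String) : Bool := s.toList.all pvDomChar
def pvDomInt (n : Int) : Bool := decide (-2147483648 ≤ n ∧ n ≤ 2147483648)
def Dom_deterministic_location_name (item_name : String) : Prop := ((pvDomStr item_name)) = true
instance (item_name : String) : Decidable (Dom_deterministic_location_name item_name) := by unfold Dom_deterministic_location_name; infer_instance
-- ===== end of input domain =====

-- B replaces A's per-call build/sort/index with a lookup in a precomputed constant
-- map from item name to its round-robin location (objective: faster, constant factor).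
-- Python raises where Pre_ does not hold (A: ValueError from list.index; B: KeyError).
-- Strings compare as their code-point lists (Python's str '<' = '<' on List Char, per PySem).

-- ===== PORT A =====
-- SEED_DATA: dict values are either a list of names (inl) or a dict name ↦ count (inr)
def SEED_DATA : List (List Char × (List (List Char) ⊕ List (List Char × Int))) :=
  [ ("Wave Probes".toList, .inl ["WP_15cm".toList, "WP_10cm".toList, "WP_30cm".toList, "WP_45cm".toList, "WP_65cm".toList, "WP_100cm".toList]),
    ("Wave Gauge Heads".toList, .inr [("AWP24-3".toList, 5), ("AWP24-2".toList, 8), ("AWP24".toList, 13)]),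
    ("Cameras".toList, .inl ["Nikon D90".toList, "Nikon D5300".toList, "Nikon D7500".toList, "Canon Rebel".toList]),
    ("Cables".toList, .inl ["Pressure sensor cable".toList, "BNC cable".toList, "6 pin cable".toList, "AC power cable".toList, "Ethernet cable".toList]),
    ("Devices".toList, .inl ["WiFi switch".toList, "Transmitter receiver".toList]),
    ("Displacement Sensors".toList, .inl ["DP 1m".toList, "DP 0.5m".toList, "DP 3m".toList]) ]

def SEED_LOCATIONS : List String := ["LWB", "CWB", "LWF", "SWL", "MWF"]

-- items.keys() if isinstance(items, dict) else items
def pvNormalized (items : List (List Char) ⊕ List (List Char × Int)) : List (List Char) :=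
  match items with
  | .inl l => l
  | .inr d => d.map Prod.fst

def deterministic_location_name (item_name : String) : String :=
  let ordered_names : List (List Char × List Char) :=
    SEED_DATA.foldl (fun acc p => acc ++ (pvNormalized p.2).map (fun n => (p.1, n))) []
  let ordered_names := PySem.List.sorted2 ordered_names Prod.fst Prod.snd
  let item_names := ordered_names.map Prod.snd
  match PySem.List.index? item_names item_name.toList with
  | none => ""   -- Python raises ValueError here; excluded by Pre_
  | some i =>
      PySem.List.pyGetD SEED_LOCATIONS (PySem.Int.mod (Int.ofNat i) (SEED_LOCATIONS.length : Int)) ""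

-- ===== PORT B =====
-- the precomputed constant dict of Source B: item name ↦ location
def LOCATION_BY_ITEM : PySem.Dict (List Char) String :=
  PySem.Dict.ofList
  [ ("6 pin cable".toList, "LWB"),
    ("AC power cable".toList, "CWB"),
    ("BNC cable".toList, "LWF"),
    ("Ethernet cable".toList, "SWL"),
    ("Pressure sensor cable".toList, "MWF"),
    ("Canon Rebel".toList, "LWB"),
    ("Nikon D5300".toList, "CWB"),
    ("Nikon D7500".toList, "LWF"),
    ("Nikon D90".toList, "SWL"),
    ("Transmitter receiver".toList, "MWF"),
    ("WiFi switch".toList, "LWB"),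
    ("DP 0.5m".toList, "CWB"),
    ("DP 1m".toList, "LWF"),
    ("DP 3m".toList, "SWL"),
    ("AWP24".toList, "MWF"),
    ("AWP24-2".toList, "LWB"),
    ("AWP24-3".toList, "CWB"),
    ("WP_100cm".toList, "LWF"),
    ("WP_10cm".toList, "SWL"),
    ("WP_15cm".toList, "MWF"),
    ("WP_30cm".toList, "LWB"),
    ("WP_45cm".toList, "CWB"),
    ("WP_65cm".toList, "LWF") ]

def deterministic_location_name_alt (item_name : String) : String :=
  (PySem.Dict.get? LOCATION_BY_ITEM item_name.toList).getD ""   -- none = KeyError; excluded by Pre_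

-- ===== PRECONDITION & SPEC =====
-- Pre_ excludes exactly the names in no seed category, on which Python A raises ValueError (list.index)
-- and Python B raises KeyError.
def Pre_deterministic_location_name (item_name : String) : Prop :=
  item_name ∈ ["WP_15cm", "WP_10cm", "WP_30cm", "WP_45cm", "WP_65cm", "WP_100cm",
               "AWP24-3", "AWP24-2", "AWP24",
               "Nikon D90", "Nikon D5300", "Nikon D7500", "Canon Rebel",
               "Pressure sensor cable", "BNC cable", "6 pin cable", "AC power cable", "Ethernet cable",
               "WiFi switch", "Transmitter receiver",
               "DP 1m", "DP 0.5m", "DP 3m"]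
instance (item_name : String) : Decidable (Pre_deterministic_location_name item_name) := by unfold Pre_deterministic_location_name; infer_instance
def pvWitness_deterministic_location_name : String := "AWP24"

def Spec_deterministic_location_name (item_name : String) (out : String) : Prop := out = deterministic_location_name_alt item_name
instance (item_name : String) (out : String) : Decidable (Spec_deterministic_location_name item_name out) := by unfold Spec_deterministic_location_name; infer_instance

-- ===== CLAIM =====
def Claim_equal_deterministic_location_name : Prop := ∀ (item_name : String), Dom_deterministic_location_name item_name → Pre_deterministic_location_name item_name → Spec_deterministic_location_name item_name (deterministic_location_name item_name)

-- ===== LEMMAS AND PROOFS =====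

-- ===== VERDICT =====
theorem deterministic_location_name_spec : Claim_equal_deterministic_location_name := by
  intro s _ hp
  unfold Pre_deterministic_location_name at hp
  unfold Spec_deterministic_location_name
  fin_cases hp <;> decide
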